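-- pv_equiv track=rewrite | github.com/inout1213/botik3- | bot.py | get_quiz_result
-- ===== SOURCE A (Python) =====
-- def get_quiz_result(answers: list) -> list:
--     scores = {}
--
--     # Q1 — основная проблема
--     q1 = answers[0] if len(answers) > 0 else ""
--     q1_map = {
--         "procrastination": ["procrastination", "motivation", "self_doubt"],
--         "anxiety": ["uncertainty", "self_doubt", "burnout"],
--         "burnout": ["burnout", "motivation", "productivity"],
--         "self_doubt": ["self_doubt", "imposter", "motivation"],
--         "relations": ["conflict", "toxic_relationships", "loneliness"],
--     }
--     for key in q1_map.get(q1, []):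
--         scores[key] = scores.get(key, 0) + 3
--
--     # Q2 — давность
--     q2 = answers[1] if len(answers) > 1 else ""
--     if q2 == "chronic":
--         for key in ["burnout", "self_doubt", "loneliness"]:
--             scores[key] = scores.get(key, 0) + 1
--     elif q2 == "recent":
--         for key in ["uncertainty", "decisions"]:
--             scores[key] = scores.get(key, 0) + 1
--
--     # Q3 — влияние
--     q3 = answers[2] if len(answers) > 2 else ""
--     if q3 == "work":
--         for key in ["productivity", "procrastination", "burnout"]:
--             scores[key] = scores.get(key, 0) + 2
--     elif q3 == "relations_impact":
--         for key in ["conflict", "toxic_relationships", "loneliness"]: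
--             scores[key] = scores.get(key, 0) + 2
--     elif q3 == "everything":
--         for key in ["burnout", "motivation", "uncertainty"]:
--             scores[key] = scores.get(key, 0) + 2
--     elif q3 == "self":
--         for key in ["self_doubt", "imposter", "decisions"]:
--             scores[key] = scores.get(key, 0) + 2
--
--     # Q4 — опыт
--     q4 = answers[3] if len(answers) > 3 else ""
--     if q4 == "tried":
--         for key in ["burnout", "self_doubt", "uncertainty"]:
--             scores[key] = scores.get(key, 0) + 1
--     elif q4 == "first":
--         for key in ["motivation", "procrastination"]:
--             scores[key] = scores.get(key, 0) + 1
--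
--     # Q5 — цель
--     q5 = answers[4] if len(answers) > 4 else ""
--     if q5 == "plan":
--         for key in ["productivity", "decisions", "procrastination"]:
--             scores[key] = scores.get(key, 0) + 1
--     elif q5 == "understand":
--         for key in ["self_doubt", "imposter", "uncertainty"]:
--             scores[key] = scores.get(key, 0) + 1
--     elif q5 == "longterm":
--         for key in ["burnout", "motivation", "self_doubt"]:
--             scores[key] = scores.get(key, 0) + 1
--     elif q5 == "fast":
--         for key in ["procrastination", "motivation", "productivity"]:
--             scores[key] = scores.get(key, 0) + 1
--
--     # Топ 3 протокола
--     sorted_keys = sorted(scores, key=lambda k: scores[k], reverse=True)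
--     return sorted_keys[:3] if sorted_keys else ["uncertainty", "motivation", "self_doubt"]
-- ===== SOURCE B (Python) =====
-- # Different algorithm: flat rule list -> (key, weight) event stream; first-occurrence
-- # dedup gives candidate order; top-3 picked by repeated first-max selection (no sort),
-- # scores obtained by summing matching events (no dict accumulator).
--
-- RULES = [
--     (0, "procrastination", 3, ["procrastination", "motivation", "self_doubt"]),
--     (0, "anxiety", 3, ["uncertainty", "self_doubt", "burnout"]),
--     (0, "burnout", 3, ["burnout", "motivation", "productivity"]),
--     (0, "self_doubt", 3, ["self_doubt", "imposter", "motivation"]),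
--     (0, "relations", 3, ["conflict", "toxic_relationships", "loneliness"]),
--     (1, "chronic", 1, ["burnout", "self_doubt", "loneliness"]),
--     (1, "recent", 1, ["uncertainty", "decisions"]),
--     (2, "work", 2, ["productivity", "procrastination", "burnout"]),
--     (2, "relations_impact", 2, ["conflict", "toxic_relationships", "loneliness"]),
--     (2, "everything", 2, ["burnout", "motivation", "uncertainty"]),
--     (2, "self", 2, ["self_doubt", "imposter", "decisions"]),
--     (3, "tried", 1, ["burnout", "self_doubt", "uncertainty"]),
--     (3, "first", 1, ["motivation", "procrastination"]),
--     (4, "plan", 1, ["productivity", "decisions", "procrastination"]),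
--     (4, "understand", 1, ["self_doubt", "imposter", "uncertainty"]),
--     (4, "longterm", 1, ["burnout", "motivation", "self_doubt"]),
--     (4, "fast", 1, ["procrastination", "motivation", "productivity"]),
-- ]
--
--
-- def get_quiz_result(answers: list) -> list:
--     events = []
--     for i, ans, w, keys in RULES:
--         if i < len(answers) and answers[i] == ans:
--             for k in keys:
--                 events.append((k, w))
--     order = []
--     for k, _ in events:
--         if k not in order:
--             order.append(k)
--     if not order:
--         return ["uncertainty", "motivation", "self_doubt"]
--     result = []
--     remaining = order
--     for _ in range(min(3, len(remaining))):
--         best = max(remaining, key=lambda k: sum(w for x, w in events if x == k))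
--         result.append(best)
--         remaining = [k for k in remaining if k != best]
--     return result
-- ===== Notes on version B (the rewrite author's own statement) =====
-- stated objective: alternative
-- what changed: B matches a flat rule list against the answers to emit a (key, weight) event stream, dedups first occurrences for candidate order, scores by summing matching events, and selects the top 3 by repeated first-max extraction instead of A's per-question if/elif dict accumulation followed by a stable descending sort.
import Mathlib
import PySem

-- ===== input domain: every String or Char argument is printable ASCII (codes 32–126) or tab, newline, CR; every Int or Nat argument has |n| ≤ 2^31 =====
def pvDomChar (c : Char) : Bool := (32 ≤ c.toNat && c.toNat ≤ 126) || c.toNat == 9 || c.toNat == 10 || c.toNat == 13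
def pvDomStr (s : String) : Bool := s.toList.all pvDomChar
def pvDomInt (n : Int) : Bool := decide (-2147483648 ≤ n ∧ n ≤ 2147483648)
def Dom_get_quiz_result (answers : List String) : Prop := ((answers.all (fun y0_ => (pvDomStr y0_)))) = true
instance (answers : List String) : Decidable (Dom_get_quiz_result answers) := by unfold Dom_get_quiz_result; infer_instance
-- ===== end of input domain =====

-- B is a different algorithm of similar cost: a flat rule list emits a (key, weight)
-- event stream, candidates are the first-occurrence dedup of the events, and the top 3
-- are picked by repeated first-max selection over summed event weights (no dict, no sort).

-- ===== PORT A =====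
def get_quiz_result (answers : List String) : List String :=
  let scores : PySem.Dict String Int := PySem.Dict.empty
  let q1 := if (0 : Int) < PySem.List.len answers then PySem.List.pyGetD answers 0 "" else ""
  let q1_map : PySem.Dict String (List String) := PySem.Dict.ofList
    [("procrastination", ["procrastination", "motivation", "self_doubt"]),
     ("anxiety", ["uncertainty", "self_doubt", "burnout"]),
     ("burnout", ["burnout", "motivation", "productivity"]),
     ("self_doubt", ["self_doubt", "imposter", "motivation"]),
     ("relations", ["conflict", "toxic_relationships", "loneliness"])]
  let scores := (q1_map.getD q1 []).foldl (fun s k => s.insert k (s.getD k 0 + 3)) scores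
  let q2 := if (1 : Int) < PySem.List.len answers then PySem.List.pyGetD answers 1 "" else ""
  let scores :=
    if q2 = "chronic" then
      (["burnout", "self_doubt", "loneliness"]).foldl (fun s k => s.insert k (s.getD k 0 + 1)) scores
    else if q2 = "recent" then
      (["uncertainty", "decisions"]).foldl (fun s k => s.insert k (s.getD k 0 + 1)) scores
    else scores
  let q3 := if (2 : Int) < PySem.List.len answers then PySem.List.pyGetD answers 2 "" else ""
  let scores :=
    if q3 = "work" then
      (["productivity", "procrastination", "burnout"]).foldl (fun s k => s.insert k (s.getD k 0 + 2)) scores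
    else if q3 = "relations_impact" then
      (["conflict", "toxic_relationships", "loneliness"]).foldl (fun s k => s.insert k (s.getD k 0 + 2)) scores
    else if q3 = "everything" then
      (["burnout", "motivation", "uncertainty"]).foldl (fun s k => s.insert k (s.getD k 0 + 2)) scores
    else if q3 = "self" then
      (["self_doubt", "imposter", "decisions"]).foldl (fun s k => s.insert k (s.getD k 0 + 2)) scores
    else scores
  let q4 := if (3 : Int) < PySem.List.len answers then PySem.List.pyGetD answers 3 "" else ""
  let scores :=
    if q4 = "tried" then
      (["burnout", "self_doubt", "uncertainty"]).foldl (fun s k => s.insert k (s.getD k 0 + 1)) scores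
    else if q4 = "first" then
      (["motivation", "procrastination"]).foldl (fun s k => s.insert k (s.getD k 0 + 1)) scores
    else scores
  let q5 := if (4 : Int) < PySem.List.len answers then PySem.List.pyGetD answers 4 "" else ""
  let scores :=
    if q5 = "plan" then
      (["productivity", "decisions", "procrastination"]).foldl (fun s k => s.insert k (s.getD k 0 + 1)) scores
    else if q5 = "understand" then
      (["self_doubt", "imposter", "uncertainty"]).foldl (fun s k => s.insert k (s.getD k 0 + 1)) scores
    else if q5 = "longterm" then
      (["burnout", "motivation", "self_doubt"]).foldl (fun s k => s.insert k (s.getD k 0 + 1)) scores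
    else if q5 = "fast" then
      (["procrastination", "motivation", "productivity"]).foldl (fun s k => s.insert k (s.getD k 0 + 1)) scores
    else scores
  let sorted_keys := PySem.List.sorted scores.keys (fun k => scores.getD k 0) true
  if sorted_keys ≠ [] then sorted_keys.take 3 else ["uncertainty", "motivation", "self_doubt"]

-- ===== PORT B =====
-- Source B's RULES table: (question index, answer, weight, scored keys)
def quizRules : List (Int × String × Int × List String) :=
  [(0, "procrastination", 3, ["procrastination", "motivation", "self_doubt"]),
   (0, "anxiety", 3, ["uncertainty", "self_doubt", "burnout"]),
   (0, "burnout", 3, ["burnout", "motivation", "productivity"]),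
   (0, "self_doubt", 3, ["self_doubt", "imposter", "motivation"]),
   (0, "relations", 3, ["conflict", "toxic_relationships", "loneliness"]),
   (1, "chronic", 1, ["burnout", "self_doubt", "loneliness"]),
   (1, "recent", 1, ["uncertainty", "decisions"]),
   (2, "work", 2, ["productivity", "procrastination", "burnout"]),
   (2, "relations_impact", 2, ["conflict", "toxic_relationships", "loneliness"]),
   (2, "everything", 2, ["burnout", "motivation", "uncertainty"]),
   (2, "self", 2, ["self_doubt", "imposter", "decisions"]),
   (3, "tried", 1, ["burnout", "self_doubt", "uncertainty"]),
   (3, "first", 1, ["motivation", "procrastination"]),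
   (4, "plan", 1, ["productivity", "decisions", "procrastination"]),
   (4, "understand", 1, ["self_doubt", "imposter", "uncertainty"]),
   (4, "longterm", 1, ["burnout", "motivation", "self_doubt"]),
   (4, "fast", 1, ["procrastination", "motivation", "productivity"])]

-- Source B's per-key score: sum(w for x, w in events if x == k)
def quizScore (events : List (String × Int)) (k : String) : Int :=
  ((events.filter (fun p => p.1 == k)).map (·.2)).sum

-- Source B's selection loop: it runs min(3, len(remaining)) rounds, each taking the first
-- maximal-score key (Python max = PySem.List.max?, none exactly when remaining is empty)
def quizSelect (events : List (String × Int)) : Nat → List String → List String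
  | 0, _ => []
  | n + 1, remaining =>
    match PySem.List.max? remaining (quizScore events) with
    | none => []
    | some best => best :: quizSelect events n (remaining.filter (fun k => k ≠ best))

def get_quiz_result_alt (answers : List String) : List String :=
  let events : List (String × Int) :=
    quizRules.foldl (fun acc r =>
      if r.1 < PySem.List.len answers ∧ PySem.List.pyGetD answers r.1 "" = r.2.1 then
        acc ++ r.2.2.2.map (fun k => (k, r.2.2.1))
      else acc) []
  let order : List String :=
    events.foldl (fun o p => if p.1 ∈ o then o else o ++ [p.1]) []
  if order = [] then ["uncertainty", "motivation", "self_doubt"]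
  else quizSelect events 3 order

-- ===== PRECONDITION & SPEC =====
def Spec_get_quiz_result (answers : List String) (out : List String) : Prop := out = get_quiz_result_alt answers
instance (answers : List String) (out : List String) : Decidable (Spec_get_quiz_result answers out) := by unfold Spec_get_quiz_result; infer_instance

-- ===== CLAIM (what is proved, stated in full; the proofs are below) =====
def Claim_equal_get_quiz_result : Prop := ∀ (answers : List String), Dom_get_quiz_result answers → Spec_get_quiz_result answers (get_quiz_result answers)

-- ===== LEMMAS AND PROOFS =====

-- dict accumulation over an event stream (A's scoring, reshaped)
def dfold (d : PySem.Dict String Int) (ev : List (String × Int)) : PySem.Dict String Int :=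
  ev.foldl (fun s p => s.insert p.1 (s.getD p.1 0 + p.2)) d

-- A's inner scoring loop over a key list
def addKeys (w : Int) (s : PySem.Dict String Int) (keys : List String) : PySem.Dict String Int :=
  keys.foldl (fun s k => s.insert k (s.getD k 0 + w)) s

-- B's event list, named so the proofs can speak about it (identical term to the port's)
def eventsB (answers : List String) : List (String × Int) :=
  quizRules.foldl (fun acc r =>
    if r.1 < PySem.List.len answers ∧ PySem.List.pyGetD answers r.1 "" = r.2.1 then
      acc ++ r.2.2.2.map (fun k => (k, r.2.2.1))
    else acc) []

lemma dfold_append (d : PySem.Dict String Int) (a b : List (String × Int)) :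
    dfold d (a ++ b) = dfold (dfold d a) b := List.foldl_append ..

lemma ite_append {b : Type} (c : Prop) [Decidable c] (acc x : List b) :
    (if c then acc ++ x else acc) = acc ++ (if c then x else []) := by
  split_ifs <;> simp

-- the score a dict accumulates is the sum of the matching event weights
lemma getD_dfold (ev : List (String × Int)) (d : PySem.Dict String Int) (k : String) :
    (dfold d ev).getD k 0 = d.getD k 0 + quizScore ev k := by
  induction ev generalizing d with
  | nil => simp [dfold, quizScore]
  | cons p t ih =>
    show (dfold (d.insert p.1 (d.getD p.1 0 + p.2)) t).getD k 0 = _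
    rw [ih]
    by_cases hk : p.1 = k
    · simp [quizScore, hk]
      ring
    · simp [quizScore, PySem.Dict.getD_insert, hk, Ne.symm hk]

-- A's q1 dict lookup as an if/elif chain
lemma tab_getD_1 (q : String) :
    (PySem.Dict.ofList
      [("procrastination", ["procrastination", "motivation", "self_doubt"]),
       ("anxiety", ["uncertainty", "self_doubt", "burnout"]),
       ("burnout", ["burnout", "motivation", "productivity"]),
       ("self_doubt", ["self_doubt", "imposter", "motivation"]),
       ("relations", ["conflict", "toxic_relationships", "loneliness"])] : PySem.Dict String (List String)).getD q []
    = if q = "procrastination" then ["procrastination", "motivation", "self_doubt"]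
      else if q = "anxiety" then ["uncertainty", "self_doubt", "burnout"]
      else if q = "burnout" then ["burnout", "motivation", "productivity"]
      else if q = "self_doubt" then ["self_doubt", "imposter", "motivation"]
      else if q = "relations" then ["conflict", "toxic_relationships", "loneliness"] else [] := by
  have hof : (PySem.Dict.ofList
      [("procrastination", ["procrastination", "motivation", "self_doubt"]),
       ("anxiety", ["uncertainty", "self_doubt", "burnout"]),
       ("burnout", ["burnout", "motivation", "productivity"]),
       ("self_doubt", ["self_doubt", "imposter", "motivation"]),
       ("relations", ["conflict", "toxic_relationships", "loneliness"])] : PySem.Dict String (List String))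
      = PySem.Dict.mk
      [("procrastination", ["procrastination", "motivation", "self_doubt"]),
       ("anxiety", ["uncertainty", "self_doubt", "burnout"]),
       ("burnout", ["burnout", "motivation", "productivity"]),
       ("self_doubt", ["self_doubt", "imposter", "motivation"]),
       ("relations", ["conflict", "toxic_relationships", "loneliness"])] := by decide
  by_cases h1 : q = "procrastination"
  · subst h1; decide
  by_cases h2 : q = "anxiety"
  · subst h2; decide
  by_cases h3 : q = "burnout"
  · subst h3; decide
  by_cases h4 : q = "self_doubt"
  · subst h4; decide
  by_cases h5 : q = "relations"
  · subst h5; decide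
  rw [hof, PySem.Dict.getD_eq_get?_getD]
  simp [PySem.Dict.get?, Ne.symm h1, Ne.symm h2, Ne.symm h3, Ne.symm h4, Ne.symm h5, h1, h2, h3, h4, h5]

lemma max?_append_singleton (t : List String) (x : String) (f : String → Int) :
    PySem.List.max? (t ++ [x]) f =
      some (match PySem.List.max? t f with
            | none => x
            | some m => if f m < f x then x else m) := by
  unfold PySem.List.max?
  rw [List.foldl_append]
  rcases h : List.foldl _ (none : Option String) t with _ | m
  · simp [List.foldl]
  · simp only [List.foldl]
    split_ifs <;> rfl

lemma sorted_rev_append_singleton (t : List String) (x : String) (f : String → Int) :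
    PySem.List.sorted (t ++ [x]) f true =
      PySem.List.insertBy (fun a b => decide (f b < f a)) x (PySem.List.sorted t f true) := by
  rw [PySem.List.sorted_rev_eq_foldl_insertBy, PySem.List.sorted_rev_eq_foldl_insertBy,
    List.foldl_append]
  rfl

lemma insertBy_cons_false {before : String → String → Bool} {x y : String} (ys : List String)
    (h : before x y = false) :
    PySem.List.insertBy before x (y :: ys) = y :: PySem.List.insertBy before x ys := by
  simp [PySem.List.insertBy, h]

lemma insertBy_cons_true {before : String → String → Bool} {x y : String} (ys : List String)
    (h : before x y = true) :
    PySem.List.insertBy before x (y :: ys) = x :: y :: ys := by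
  simp [PySem.List.insertBy, h]

lemma sorted_rev_step (f : String → Int) (l : List String) (m : String)
    (hnd : l.Nodup) (hm : PySem.List.max? l f = some m) :
    PySem.List.sorted l f true = m :: PySem.List.sorted (l.erase m) f true := by
  induction l using List.reverseRecOn generalizing m with
  | nil => simp [PySem.List.max?] at hm
  | append_singleton t x ih =>
    have hx : x ∉ t := by simp [List.nodup_append] at hnd; tauto
    have hndt : t.Nodup := (List.nodup_append.mp hnd).1
    rw [max?_append_singleton] at hm
    rcases ht : PySem.List.max? t f with _ | mt
    · have htnil : t = [] := (PySem.List.max?_eq_none_iff t f).mp ht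
      subst htnil
      rw [ht] at hm
      simp at hm
      subst hm
      simp [PySem.List.sorted, PySem.List.insertBy, List.foldl]
    · rw [ht] at hm
      have hm' : m = if f mt < f x then x else mt := by
        simp at hm; exact hm.symm
      by_cases hlt : f mt < f x
      · rw [if_pos hlt] at hm'
        subst hm'
        rw [sorted_rev_append_singleton, ih mt hndt ht]
        rw [insertBy_cons_true _ (by simp [hlt])]
        rw [List.erase_append_right _ hx]
        simp [← ih mt hndt ht]
      · rw [if_neg hlt] at hm'
        subst hm'
        have hmem : m ∈ t := PySem.List.max?_mem (key := f) ht
        rw [sorted_rev_append_singleton, ih m hndt ht]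
        rw [insertBy_cons_false _ (by simp [hlt])]
        rw [List.erase_append_left _ hmem, sorted_rev_append_singleton]

lemma quizSelect_eq (ev : List (String × Int)) (n : Nat) (l : List String) (hnd : l.Nodup) :
    quizSelect ev n l = (PySem.List.sorted l (quizScore ev) true).take n := by
  induction n generalizing l with
  | zero => rfl
  | succ n ih =>
    rcases hm : PySem.List.max? l (quizScore ev) with _ | m
    · have : l = [] := (PySem.List.max?_eq_none_iff l _).mp hm
      subst this
      simp [quizSelect, PySem.List.sorted, hm]
    · rw [sorted_rev_step _ l m hnd hm]
      have hfe : l.erase m = l.filter (fun k => k ≠ m) := by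
        rw [List.Nodup.erase_eq_filter hnd]
        exact List.filter_congr (fun x _ => by by_cases h : x = m <;> simp [h, bne])
      show (match PySem.List.max? l (quizScore ev) with
            | none => []
            | some best => best :: quizSelect ev n (l.filter (fun k => k ≠ best)))
          = _
      rw [hm]
      simp only [List.take_succ_cons, ← hfe]
      rw [ih _ (hnd.erase m)]

lemma st1 (c : Prop) [Decidable c] (q : String) (d : PySem.Dict String Int) :
    addKeys 3 d ((PySem.Dict.ofList
      [("procrastination", ["procrastination", "motivation", "self_doubt"]),
       ("anxiety", ["uncertainty", "self_doubt", "burnout"]),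
       ("burnout", ["burnout", "motivation", "productivity"]),
       ("self_doubt", ["self_doubt", "imposter", "motivation"]),
       ("relations", ["conflict", "toxic_relationships", "loneliness"])] : PySem.Dict String (List String)).getD
      (if c then q else "") [])
    = dfold d
      ((if c ∧ q = "procrastination" then [("procrastination", 3), ("motivation", 3), ("self_doubt", 3)] else []) ++
       (if c ∧ q = "anxiety" then [("uncertainty", 3), ("self_doubt", 3), ("burnout", 3)] else []) ++
       (if c ∧ q = "burnout" then [("burnout", 3), ("motivation", 3), ("productivity", 3)] else []) ++
       (if c ∧ q = "self_doubt" then [("self_doubt", 3), ("imposter", 3), ("motivation", 3)] else []) ++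
       (if c ∧ q = "relations" then [("conflict", 3), ("toxic_relationships", 3), ("loneliness", 3)] else [])) := by
  rw [tab_getD_1]
  by_cases hc : c
  · by_cases h0 : q = "procrastination"
    · simp [hc, h0]
      rfl
    by_cases h1 : q = "anxiety"
    · simp [hc, h1]
      rfl
    by_cases h2 : q = "burnout"
    · simp [hc, h2]
      rfl
    by_cases h3 : q = "self_doubt"
    · simp [hc, h3]
      rfl
    by_cases h4 : q = "relations"
    · simp [hc, h4]
      rfl
    simp [hc, h0, h1, h2, h3, h4]
    rfl
  · simp [hc]
    rfl

lemma st2 (c : Prop) [Decidable c] (q : String) (d : PySem.Dict String Int) :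
    (if (if c then q else "") = "chronic" then addKeys 1 d ["burnout", "self_doubt", "loneliness"]
      else if (if c then q else "") = "recent" then addKeys 1 d ["uncertainty", "decisions"]
      else d)
    = dfold d
      ((if c ∧ q = "chronic" then [("burnout", 1), ("self_doubt", 1), ("loneliness", 1)] else []) ++
       (if c ∧ q = "recent" then [("uncertainty", 1), ("decisions", 1)] else [])) := by
  by_cases hc : c
  · by_cases h0 : q = "chronic"
    · simp [hc, h0]
      rfl
    by_cases h1 : q = "recent"
    · simp [hc, h1]
      rfl
    simp [hc, h0, h1]
    rfl
  · simp [hc]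
    rfl

lemma st3 (c : Prop) [Decidable c] (q : String) (d : PySem.Dict String Int) :
    (if (if c then q else "") = "work" then addKeys 2 d ["productivity", "procrastination", "burnout"]
      else if (if c then q else "") = "relations_impact" then addKeys 2 d ["conflict", "toxic_relationships", "loneliness"]
      else if (if c then q else "") = "everything" then addKeys 2 d ["burnout", "motivation", "uncertainty"]
      else if (if c then q else "") = "self" then addKeys 2 d ["self_doubt", "imposter", "decisions"]
      else d)
    = dfold d
      ((if c ∧ q = "work" then [("productivity", 2), ("procrastination", 2), ("burnout", 2)] else []) ++
       (if c ∧ q = "relations_impact" then [("conflict", 2), ("toxic_relationships", 2), ("loneliness", 2)] else []) ++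
       (if c ∧ q = "everything" then [("burnout", 2), ("motivation", 2), ("uncertainty", 2)] else []) ++
       (if c ∧ q = "self" then [("self_doubt", 2), ("imposter", 2), ("decisions", 2)] else [])) := by
  by_cases hc : c
  · by_cases h0 : q = "work"
    · simp [hc, h0]
      rfl
    by_cases h1 : q = "relations_impact"
    · simp [hc, h1]
      rfl
    by_cases h2 : q = "everything"
    · simp [hc, h2]
      rfl
    by_cases h3 : q = "self"
    · simp [hc, h3]
      rfl
    simp [hc, h0, h1, h2, h3]
    rfl
  · simp [hc]
    rfl

lemma st4 (c : Prop) [Decidable c] (q : String) (d : PySem.Dict String Int) :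
    (if (if c then q else "") = "tried" then addKeys 1 d ["burnout", "self_doubt", "uncertainty"]
      else if (if c then q else "") = "first" then addKeys 1 d ["motivation", "procrastination"]
      else d)
    = dfold d
      ((if c ∧ q = "tried" then [("burnout", 1), ("self_doubt", 1), ("uncertainty", 1)] else []) ++
       (if c ∧ q = "first" then [("motivation", 1), ("procrastination", 1)] else [])) := by
  by_cases hc : c
  · by_cases h0 : q = "tried"
    · simp [hc, h0]
      rfl
    by_cases h1 : q = "first"
    · simp [hc, h1]
      rfl
    simp [hc, h0, h1]
    rfl
  · simp [hc]
    rfl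

lemma st5 (c : Prop) [Decidable c] (q : String) (d : PySem.Dict String Int) :
    (if (if c then q else "") = "plan" then addKeys 1 d ["productivity", "decisions", "procrastination"]
      else if (if c then q else "") = "understand" then addKeys 1 d ["self_doubt", "imposter", "uncertainty"]
      else if (if c then q else "") = "longterm" then addKeys 1 d ["burnout", "motivation", "self_doubt"]
      else if (if c then q else "") = "fast" then addKeys 1 d ["procrastination", "motivation", "productivity"]
      else d)
    = dfold d
      ((if c ∧ q = "plan" then [("productivity", 1), ("decisions", 1), ("procrastination", 1)] else []) ++
       (if c ∧ q = "understand" then [("self_doubt", 1), ("imposter", 1), ("uncertainty", 1)] else []) ++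
       (if c ∧ q = "longterm" then [("burnout", 1), ("motivation", 1), ("self_doubt", 1)] else []) ++
       (if c ∧ q = "fast" then [("procrastination", 1), ("motivation", 1), ("productivity", 1)] else [])) := by
  by_cases hc : c
  · by_cases h0 : q = "plan"
    · simp [hc, h0]
      rfl
    by_cases h1 : q = "understand"
    · simp [hc, h1]
      rfl
    by_cases h2 : q = "longterm"
    · simp [hc, h2]
      rfl
    by_cases h3 : q = "fast"
    · simp [hc, h3]
      rfl
    simp [hc, h0, h1, h2, h3]
    rfl
  · simp [hc]
    rfl

lemma events_eq (answers : List String) :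
    eventsB answers
    = ((if (0 : Int) < PySem.List.len answers ∧ PySem.List.pyGetD answers (0 : Int) "" = "procrastination" then [("procrastination", 3), ("motivation", 3), ("self_doubt", 3)] else []) ++
       (if (0 : Int) < PySem.List.len answers ∧ PySem.List.pyGetD answers (0 : Int) "" = "anxiety" then [("uncertainty", 3), ("self_doubt", 3), ("burnout", 3)] else []) ++
       (if (0 : Int) < PySem.List.len answers ∧ PySem.List.pyGetD answers (0 : Int) "" = "burnout" then [("burnout", 3), ("motivation", 3), ("productivity", 3)] else []) ++
       (if (0 : Int) < PySem.List.len answers ∧ PySem.List.pyGetD answers (0 : Int) "" = "self_doubt" then [("self_doubt", 3), ("imposter", 3), ("motivation", 3)] else []) ++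
       (if (0 : Int) < PySem.List.len answers ∧ PySem.List.pyGetD answers (0 : Int) "" = "relations" then [("conflict", 3), ("toxic_relationships", 3), ("loneliness", 3)] else [])) ++
      (((if (1 : Int) < PySem.List.len answers ∧ PySem.List.pyGetD answers (1 : Int) "" = "chronic" then [("burnout", 1), ("self_doubt", 1), ("loneliness", 1)] else []) ++
       (if (1 : Int) < PySem.List.len answers ∧ PySem.List.pyGetD answers (1 : Int) "" = "recent" then [("uncertainty", 1), ("decisions", 1)] else [])) ++
      (((if (2 : Int) < PySem.List.len answers ∧ PySem.List.pyGetD answers (2 : Int) "" = "work" then [("productivity", 2), ("procrastination", 2), ("burnout", 2)] else []) ++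
       (if (2 : Int) < PySem.List.len answers ∧ PySem.List.pyGetD answers (2 : Int) "" = "relations_impact" then [("conflict", 2), ("toxic_relationships", 2), ("loneliness", 2)] else []) ++
       (if (2 : Int) < PySem.List.len answers ∧ PySem.List.pyGetD answers (2 : Int) "" = "everything" then [("burnout", 2), ("motivation", 2), ("uncertainty", 2)] else []) ++
       (if (2 : Int) < PySem.List.len answers ∧ PySem.List.pyGetD answers (2 : Int) "" = "self" then [("self_doubt", 2), ("imposter", 2), ("decisions", 2)] else [])) ++
      (((if (3 : Int) < PySem.List.len answers ∧ PySem.List.pyGetD answers (3 : Int) "" = "tried" then [("burnout", 1), ("self_doubt", 1), ("uncertainty", 1)] else []) ++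
       (if (3 : Int) < PySem.List.len answers ∧ PySem.List.pyGetD answers (3 : Int) "" = "first" then [("motivation", 1), ("procrastination", 1)] else [])) ++
      ((if (4 : Int) < PySem.List.len answers ∧ PySem.List.pyGetD answers (4 : Int) "" = "plan" then [("productivity", 1), ("decisions", 1), ("procrastination", 1)] else []) ++
       (if (4 : Int) < PySem.List.len answers ∧ PySem.List.pyGetD answers (4 : Int) "" = "understand" then [("self_doubt", 1), ("imposter", 1), ("uncertainty", 1)] else []) ++
       (if (4 : Int) < PySem.List.len answers ∧ PySem.List.pyGetD answers (4 : Int) "" = "longterm" then [("burnout", 1), ("motivation", 1), ("self_doubt", 1)] else []) ++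
       (if (4 : Int) < PySem.List.len answers ∧ PySem.List.pyGetD answers (4 : Int) "" = "fast" then [("procrastination", 1), ("motivation", 1), ("productivity", 1)] else []))))) := by
  simp only [eventsB, quizRules, List.foldl_cons, List.foldl_nil, ite_append,
    List.append_assoc, List.nil_append, List.map_cons, List.map_nil]

-- A's score dict (the port's let chain, with its inner loops written as addKeys)
def scoresM (answers : List String) : PySem.Dict String Int :=
  let q1 := if (0 : Int) < PySem.List.len answers then PySem.List.pyGetD answers 0 "" else ""
  let scores := addKeys 3 PySem.Dict.empty
    ((PySem.Dict.ofList
      [("procrastination", ["procrastination", "motivation", "self_doubt"]),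
       ("anxiety", ["uncertainty", "self_doubt", "burnout"]),
       ("burnout", ["burnout", "motivation", "productivity"]),
       ("self_doubt", ["self_doubt", "imposter", "motivation"]),
       ("relations", ["conflict", "toxic_relationships", "loneliness"])] : PySem.Dict String (List String)).getD q1 [])
  let q2 := if (1 : Int) < PySem.List.len answers then PySem.List.pyGetD answers 1 "" else ""
  let scores :=
    if q2 = "chronic" then addKeys 1 scores ["burnout", "self_doubt", "loneliness"]
    else if q2 = "recent" then addKeys 1 scores ["uncertainty", "decisions"]
    else scores
  let q3 := if (2 : Int) < PySem.List.len answers then PySem.List.pyGetD answers 2 "" else ""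
  let scores :=
    if q3 = "work" then addKeys 2 scores ["productivity", "procrastination", "burnout"]
    else if q3 = "relations_impact" then addKeys 2 scores ["conflict", "toxic_relationships", "loneliness"]
    else if q3 = "everything" then addKeys 2 scores ["burnout", "motivation", "uncertainty"]
    else if q3 = "self" then addKeys 2 scores ["self_doubt", "imposter", "decisions"]
    else scores
  let q4 := if (3 : Int) < PySem.List.len answers then PySem.List.pyGetD answers 3 "" else ""
  let scores :=
    if q4 = "tried" then addKeys 1 scores ["burnout", "self_doubt", "uncertainty"]
    else if q4 = "first" then addKeys 1 scores ["motivation", "procrastination"]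
    else scores
  let q5 := if (4 : Int) < PySem.List.len answers then PySem.List.pyGetD answers 4 "" else ""
  if q5 = "plan" then addKeys 1 scores ["productivity", "decisions", "procrastination"]
  else if q5 = "understand" then addKeys 1 scores ["self_doubt", "imposter", "uncertainty"]
  else if q5 = "longterm" then addKeys 1 scores ["burnout", "motivation", "self_doubt"]
  else if q5 = "fast" then addKeys 1 scores ["procrastination", "motivation", "productivity"]
  else scores

-- A's whole score dict is the dict accumulation of B's event stream
lemma dict_eq (answers : List String) :
    dfold PySem.Dict.empty (eventsB answers) = scoresM answers := by
  rw [events_eq]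
  unfold scoresM
  simp only [st1, st2, st3, st4, st5]
  simp only [dfold_append]

-- ===== VERDICT (by name: the statement is the Claim_ definition above) =====
theorem get_quiz_result_spec : Claim_equal_get_quiz_result := by
  intro answers _
  show get_quiz_result answers = get_quiz_result_alt answers
  have hA : get_quiz_result answers
      = (if PySem.List.sorted (scoresM answers).keys (fun k => (scoresM answers).getD k 0) true ≠ [] then
           (PySem.List.sorted (scoresM answers).keys (fun k => (scoresM answers).getD k 0) true).take 3
         else ["uncertainty", "motivation", "self_doubt"]) := rfl
  have hB : get_quiz_result_alt answers
      = (if ((eventsB answers).foldl (fun o p => if p.1 ∈ o then o else o ++ [p.1]) []) = [] then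
           ["uncertainty", "motivation", "self_doubt"]
         else quizSelect (eventsB answers) 3
           ((eventsB answers).foldl (fun o p => if p.1 ∈ o then o else o ++ [p.1]) [])) := rfl
  rw [hA, hB, ← dict_eq]
  have horder : (eventsB answers).foldl (fun o p => if p.1 ∈ o then o else o ++ [p.1]) []
      = PySem.Set.ofList ((eventsB answers).map (·.1)) := by
    have hfun : (fun (o : List String) (p : String × Int) => if p.1 ∈ o then o else o ++ [p.1])
        = (fun o p => PySem.Set.add o p.1) := by
      funext o p
      rw [PySem.Set.add_eq_ite]
    rw [hfun, PySem.Set.ofList_eq_foldl, ← List.foldl_map]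
  have hkeys : (dfold PySem.Dict.empty (eventsB answers)).keys
      = PySem.Set.ofList ((eventsB answers).map (·.1)) := by
    unfold dfold
    rw [PySem.Dict.keys_foldl_insert_key (key := fun p : String × Int => p.1)
      (f := fun d p => d.getD p.1 0 + p.2)]
    simp [PySem.Set.update_nil_left]
  have hscore : (fun k => (dfold PySem.Dict.empty (eventsB answers)).getD k 0)
      = quizScore (eventsB answers) := by
    funext k
    rw [getD_dfold]
    simp
  rw [hkeys, hscore, horder]
  rw [quizSelect_eq (eventsB answers) 3 _ (PySem.Set.nodup_ofList _)]
  by_cases h : PySem.Set.ofList ((eventsB answers).map (·.1)) = []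
  · simp [h, PySem.List.sorted]
  · have hs : PySem.List.sorted (PySem.Set.ofList ((eventsB answers).map (·.1)))
        (quizScore (eventsB answers)) true ≠ [] := by
      simp [PySem.List.sorted_eq_nil_iff, h]
    simp [h, hs]
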